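-- pv_equiv track=rewrite | github.com/mintropy/PS | BAEKJOON/Python/14000/14800/14890.py | search
-- ===== SOURCE A (Python) =====
-- def search(N: int, L: int, line: list[int]) -> bool:
--     i = 1
--     check = [False] * (N + 2)
--     while i <= N:
--         if line[i] == line[i + 1]:
--             i += 1
--             continue
--         if line[i] == line[i + 1] + 1:
--             if i + L > N:
--                 return False
--             for j in range(i + 2, i + L + 1):
--                 if line[j] == line[i + 1]:
--                     continue
--                 return False
--             for j in range(i + 1, i + L + 1):
--                 check[j] = True
--             i += L
--         elif line[i] == line[i + 1] - 1:
--             if i < L: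
--                 return False
--             if check[i]:
--                 return False
--             for j in range(i - 1, i - L, -1):
--                 if check[j] or line[j] != line[i - 1]:
--                     return False
--             for j in range(i, i - L, -1):
--                 check[j] = True
--             i += 1
--         else:
--             return False
--     return True
-- ===== SOURCE B (Python) =====
-- def search(N: int, L: int, line: list[int]) -> bool:
--     # One pass over cells 1..N+1: avail = unused length of the current flat run,
--     # pending = cells still owed to a descending ramp.
--     if N <= 0:
--         return True
--     avail = 1
--     pending = 0
--     for pos in range(2, N + 2):
--         cur = line[pos]
--         prev = line[pos - 1]
--         if cur == prev:
--             if pending > 0: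
--                 pending -= 1
--             else:
--                 avail += 1
--         elif pending > 0:
--             return False
--         elif cur == prev - 1:
--             if pos - 1 + L > N:
--                 return False
--             avail = 0
--             pending = L - 1
--         elif cur == prev + 1:
--             if avail < L:
--                 return False
--             avail = 1
--         else:
--             return False
--     return pending == 0
-- ===== Notes on version B (the rewrite author's own statement) =====
-- stated objective: alternative
-- what changed: A re-scans up to L cells and maintains a boolean 'check' array at every slope; B is a single pass over the line keeping only two counters (unused length of the current flat run, and cells still owed to a descending ramp), so the inner scans and the marker array disappear.
-- outside the precondition, e.g. on search(2, 0, [0, 5, 5, 5]): A returns True, B returns True; on search(4, -1, [0, 7, 7, 7, 7, 7]): A returns True, B returns True; on search(3, 1, [0, 1, 5, 9]): A returns False, B returns False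
import Mathlib
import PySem

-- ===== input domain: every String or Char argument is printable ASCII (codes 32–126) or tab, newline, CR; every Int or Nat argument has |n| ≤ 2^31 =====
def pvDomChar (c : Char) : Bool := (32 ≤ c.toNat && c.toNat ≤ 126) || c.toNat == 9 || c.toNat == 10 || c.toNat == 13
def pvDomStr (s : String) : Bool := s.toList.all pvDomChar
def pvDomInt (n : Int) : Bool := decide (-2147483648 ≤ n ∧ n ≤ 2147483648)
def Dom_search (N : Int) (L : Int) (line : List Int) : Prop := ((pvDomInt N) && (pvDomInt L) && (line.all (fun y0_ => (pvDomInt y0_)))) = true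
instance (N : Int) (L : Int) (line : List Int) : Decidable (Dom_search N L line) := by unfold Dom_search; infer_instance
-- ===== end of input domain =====

-- B replaces A's per-slope rescans and boolean marker array by one pass with two counters (objective: alternative).

-- ===== PORT A =====
-- Literal port of A's while-loop as fuel recursion (Pre_ guarantees the fuel is
-- enough: i advances by at least 1 per iteration since L ≥ 1).  All list reads /
-- writes use the total pyGetD/pySetD forms: under Pre_ every index A touches is
-- in range, where they are exact.
def searchLoop (N L : Int) (line : List Int) : Nat → Int → List Bool → Bool
  | 0, _, _ => true
  | fuel+1, i, check =>
    if i ≤ N then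
      if PySem.List.pyGetD line i 0 = PySem.List.pyGetD line (i+1) 0 then
        searchLoop N L line fuel (i+1) check
      else if PySem.List.pyGetD line i 0 = PySem.List.pyGetD line (i+1) 0 + 1 then
        if i + L > N then false
        else if (PySem.List.pyRange (i+2) (i+L+1) 1).all
                  (fun j => PySem.List.pyGetD line j 0 == PySem.List.pyGetD line (i+1) 0) then
          searchLoop N L line fuel (i+L)
            ((PySem.List.pyRange (i+1) (i+L+1) 1).foldl (fun c j => PySem.List.pySetD c j true) check)
        else false
      else if PySem.List.pyGetD line i 0 = PySem.List.pyGetD line (i+1) 0 - 1 then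
        if i < L then false
        else if PySem.List.pyGetD check i false then false
        else if (PySem.List.pyRange (i-1) (i-L) (-1)).all
                  (fun j => !(PySem.List.pyGetD check j false)
                            && (PySem.List.pyGetD line j 0 == PySem.List.pyGetD line (i-1) 0)) then
          searchLoop N L line fuel (i+1)
            ((PySem.List.pyRange i (i-L) (-1)).foldl (fun c j => PySem.List.pySetD c j true) check)
        else false
      else false
    else true

def search (N : Int) (L : Int) (line : List Int) : Bool :=
  searchLoop N L line (N.toNat + 1) 1 (List.replicate (N+2).toNat false)

-- ===== PORT B =====
-- One pass over positions 2..N+1; state: avail = unused length of the current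
-- flat run, pending = cells still owed to a descending ramp.
def altGo (N L : Int) (line : List Int) : List Int → Int → Int → Bool
  | [], _, pending => pending == 0
  | pos :: rest, avail, pending =>
    let cur := PySem.List.pyGetD line pos 0
    let prev := PySem.List.pyGetD line (pos - 1) 0
    if cur = prev then
      if pending > 0 then altGo N L line rest avail (pending - 1)
      else altGo N L line rest (avail + 1) pending
    else if pending > 0 then false
    else if cur = prev - 1 then
      if pos - 1 + L > N then false
      else altGo N L line rest 0 (L - 1)
    else if cur = prev + 1 then
      if avail < L then false
      else altGo N L line rest 1 pending
    else false

def search_alt (N : Int) (L : Int) (line : List Int) : Bool :=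
  if N ≤ 0 then true
  else altGo N L line (PySem.List.pyRange 2 (N+2) 1) 1 0

-- ===== PRECONDITION & SPEC =====
-- Pre_ covers N ≤ 0 (A returns True without touching the line) and the
-- natural domain L ≥ 1 with the line holding the cells 1..N+1 A reads.  Outside
-- it A may raise IndexError (short line), loop forever (L = 0 at a descent) or
-- read via negative-index wraparound; on the excluded corners where A still
-- returns (L ≤ 0 with no completed descent, early False on a short line) both programs agree anyway — see the cites.
def Pre_search (N : Int) (L : Int) (line : List Int) : Prop :=
  N ≤ 0 ∨ (1 ≤ L ∧ N + 2 ≤ (line.length : Int))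
instance (N : Int) (L : Int) (line : List Int) : Decidable (Pre_search N L line) := by
  unfold Pre_search; infer_instance

def pvWitness_search : Int × Int × List Int := (4, 2, [9, 3, 3, 2, 2, 2])

def Spec_search (N : Int) (L : Int) (line : List Int) (out : Bool) : Prop := out = search_alt N L line
instance (N : Int) (L : Int) (line : List Int) (out : Bool) : Decidable (Spec_search N L line out) := by
  unfold Spec_search; infer_instance

-- ===== CLAIM (what is proved, stated in full; the proofs are below) =====
def Claim_equal_search : Prop := ∀ (N : Int) (L : Int) (line : List Int), Dom_search N L line → Pre_search N L line → Spec_search N L line (search N L line)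

-- ===== LEMMAS AND PROOFS (the simulation invariant and its preservation) =====

lemma pyGetD_replicate_false (n : Nat) (j : Int) :
    PySem.List.pyGetD (List.replicate n false) j false = false := by
  unfold PySem.List.pyGetD
  rcases h : PySem.List.pyGet? (List.replicate n false) j with _ | b
  · simp
  · have hb := PySem.List.mem_of_pyGet?_eq_some _ h
    simp at hb
    simp [hb]

lemma getD_set_int (xs : List Bool) (j m : Int) (hj0 : 0 ≤ j) (hjlen : j < (xs.length : Int)) (hm : 0 ≤ m) :
    PySem.List.pyGetD (PySem.List.pySetD xs j true) m false
      = if m = j then true else PySem.List.pyGetD xs m false := by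
  rw [show j = ((j.toNat : Nat) : Int) by omega] at hjlen ⊢
  rw [show m = ((m.toNat : Nat) : Int) by omega]
  rw [PySem.List.pyGetD_pySetD_natCast _ _ _ _ _ (by exact_mod_cast hjlen)]
  split_ifs with h1 h2 h3 <;> first | rfl | (exfalso; omega)

lemma foldl_set_true_length (js : List Int) (check : List Bool) :
    (js.foldl (fun c j => PySem.List.pySetD c j true) check).length = check.length := by
  induction js generalizing check with
  | nil => rfl
  | cons j rest ih => simp [List.foldl_cons, ih, PySem.List.length_pySetD]

lemma foldl_set_true_getD (js : List Int) (check : List Bool)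
    (hjs : ∀ j ∈ js, 0 ≤ j ∧ j < (check.length : Int)) (m : Int) (hm : 0 ≤ m) :
    PySem.List.pyGetD (js.foldl (fun c j => PySem.List.pySetD c j true) check) m false
      = (if m ∈ js then true else PySem.List.pyGetD check m false) := by
  induction js generalizing check with
  | nil => simp
  | cons j rest ih =>
    obtain ⟨hj0, hjlen⟩ := hjs j (List.mem_cons_self ..)
    rw [List.foldl_cons, ih _ (fun x hx => by
      have := hjs x (List.mem_cons_of_mem _ hx)
      rwa [PySem.List.length_pySetD])]
    rw [getD_set_int _ _ _ hj0 hjlen hm]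
    by_cases h1 : m ∈ rest <;> by_cases h2 : m = j <;> simp [h1, h2]

def SInv (line : List Int) (check : List Bool) (N i s u : Int) : Prop :=
  1 ≤ s ∧ s ≤ i ∧ i ≤ N + 1 ∧ 0 ≤ u ∧ u ≤ i - s + 1 ∧
  (∀ j, s ≤ j → j ≤ i → PySem.List.pyGetD line j 0 = PySem.List.pyGetD line i 0) ∧
  (∀ j, s ≤ j → j ≤ i → PySem.List.pyGetD check j false = decide (j - s < u)) ∧
  (∀ j, i < j → PySem.List.pyGetD check j false = false) ∧
  (2 ≤ s →
    (PySem.List.pyGetD line (s-1) 0 = PySem.List.pyGetD line i 0 - 1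
        ∧ PySem.List.pyGetD check (s-1) false = true)
    ∨ (PySem.List.pyGetD line (s-1) 0 = PySem.List.pyGetD line i 0 + 1 ∧ 1 ≤ u))

lemma walk (N L : Int) (line : List Int) (p : Nat) : ∀ b : Int, b + p ≤ N + 2 →
    altGo N L line (PySem.List.pyRange b (N+2) 1) 0 p
      = if (∀ k : Int, 0 ≤ k → k < p →
              PySem.List.pyGetD line (b+k) 0 = PySem.List.pyGetD line (b-1) 0) then
          altGo N L line (PySem.List.pyRange (b+p) (N+2) 1) 0 0
        else false := by
  induction p with
  | zero =>
    intro b hb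
    rw [if_pos (by intro k h1 h2; omega)]
    norm_num
  | succ p ih =>
    intro b hb
    have hblt : b < N + 2 := by push_cast at hb; omega
    rw [PySem.List.pyRange_one_cons hblt]
    simp only [altGo]
    by_cases hc : PySem.List.pyGetD line b 0 = PySem.List.pyGetD line (b-1) 0
    · rw [if_pos hc, if_pos (by push_cast; omega)]
      have : ((p+1 : Nat) : Int) - 1 = (p : Nat) := by push_cast; omega
      rw [this, ih (b+1) (by push_cast at hb ⊢; omega)]
      by_cases hall : ∀ k : Int, 0 ≤ k → k < p → PySem.List.pyGetD line (b+1+k) 0 = PySem.List.pyGetD line (b+1-1) 0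
      · rw [if_pos hall, if_pos ?_, show b + 1 + (p:Int) = b + ((p+1:Nat):Int) by push_cast; ring]
        intro k h1 h2
        rcases eq_or_lt_of_le h1 with h | h
        · rw [← h]; simpa using hc
        · have h3 := hall (k-1) (by omega) (by push_cast at h2 ⊢; omega)
          rw [show b + 1 + (k-1) = b + k by ring] at h3
          rw [h3]
          simpa using hc
      · rw [if_neg hall, if_neg ?_]
        intro hcon
        apply hall
        intro k h1 h2
        have h3 := hcon (k+1) (by omega) (by push_cast; omega)
        have h4 := hcon 0 (le_refl _) (by push_cast; omega)
        rw [show b + (k+1) = b + 1 + k by ring] at h3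
        rw [h3, show b + 1 - 1 = b + 0 by ring, h4]
    · rw [if_neg hc, if_pos (by push_cast; omega), if_neg ?_]
      intro hcon
      exact hc (by simpa using hcon 0 (le_refl _) (by push_cast; omega))

lemma rise_pass (N L i s u : Int) (line : List Int) (check : List Bool) (hL : 1 ≤ L)
    (hInv : SInv line check N i s u) (h : L ≤ i - s + 1 - u) :
    ¬ (i < L) ∧ PySem.List.pyGetD check i false = false ∧
    ((PySem.List.pyRange (i-1) (i-L) (-1)).all
      (fun j => !(PySem.List.pyGetD check j false)
                && (PySem.List.pyGetD line j 0 == PySem.List.pyGetD line (i-1) 0)) = true) := by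
  obtain ⟨hs1, hsi, hiN, hu0, hub, hflat, hc1, hc0, hc3⟩ := hInv
  refine ⟨by omega, ?_, ?_⟩
  · rw [hc1 i (by omega) (le_refl _)]; simp; omega
  · rw [List.all_eq_true]
    intro j hj
    rw [PySem.List.mem_pyRange_neg_one] at hj
    have hL2 : 2 ≤ L := by omega
    have h1 : s ≤ j := by omega
    have h2 : j ≤ i := by omega
    rw [hc1 j h1 h2, hflat j h1 h2, hflat (i-1) (by omega) (by omega)]
    simp; omega

lemma rise_fail (N L i s u : Int) (line : List Int) (check : List Bool)
    (hInv : SInv line check N i s u) (h : i - s + 1 - u < L) (hge : ¬ i < L) :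
    PySem.List.pyGetD check i false = true ∨
    ((PySem.List.pyRange (i-1) (i-L) (-1)).all
      (fun j => !(PySem.List.pyGetD check j false)
                && (PySem.List.pyGetD line j 0 == PySem.List.pyGetD line (i-1) 0)) = false) := by
  obtain ⟨hs1, hsi, hiN, hu0, hub, hflat, hc1, hc0, hc3⟩ := hInv
  by_cases hiu : i - s < u
  · left
    rw [hc1 i (by omega) (le_refl _)]; simp; omega
  · right
    have hw : ∃ j0, (i - L < j0 ∧ j0 ≤ i - 1) ∧
        PySem.List.pyGetD check j0 false = true := by
      by_cases hu1 : 1 ≤ u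
      · refine ⟨s + u - 1, ⟨by omega, by omega⟩, ?_⟩
        rw [hc1 _ (by omega) (by omega)]; simp; omega
      · have hs2 : 2 ≤ s := by omega
        rcases hc3 hs2 with ⟨_, hck⟩ | ⟨_, hu⟩
        · exact ⟨s - 1, ⟨by omega, by omega⟩, hck⟩
        · omega
    obtain ⟨j0, ⟨hj1, hj2⟩, hck⟩ := hw
    rw [← Bool.not_eq_true, List.all_eq_true]
    · intro hcon
      have := hcon j0 (by rw [PySem.List.mem_pyRange_neg_one]; omega)
      rw [hck] at this
      simp at this

lemma main_sim (N L : Int) (line : List Int) (hL : 1 ≤ L) :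
    ∀ fuel : Nat, ∀ i s u : Int, ∀ check : List Bool,
      (check.length : Int) = N + 2 → N + 1 - i ≤ fuel →
      SInv line check N i s u →
      searchLoop N L line fuel i check
        = altGo N L line (PySem.List.pyRange (i+1) (N+2) 1) (i - s + 1 - u) 0 := by
  intro fuel
  induction fuel with
  | zero =>
    intro i s u check hlen2 hfuel hInv
    simp only [searchLoop]
    rw [PySem.List.pyRange_one_eq_nil (by push_cast at hfuel; omega)]
    simp [altGo]
  | succ f ih =>
    intro i s u check hlen2 hfuel hInv
    obtain ⟨hs1, hsi, hiN, hu0, hub, hflat, hc1, hc0, hc3⟩ := hInv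
    simp only [searchLoop]
    by_cases hi : i ≤ N
    case neg =>
      rw [if_neg hi, PySem.List.pyRange_one_eq_nil (by omega)]
      simp [altGo]
    case pos =>
      rw [if_pos hi, PySem.List.pyRange_one_cons (show i+1 < N+2 by omega)]
      simp only [altGo, show i+1-1 = i from by ring]
      by_cases hfl : PySem.List.pyGetD line i 0 = PySem.List.pyGetD line (i+1) 0
      · -- flat step
        rw [if_pos hfl, if_pos hfl.symm, if_neg (by omega : ¬ (0:Int) > 0)]
        rw [ih (i+1) s u check hlen2 (by omega) ?inv]
        · rw [show i+1+1 = i+2 from by ring, show (i+1)-s+1-u = i-s+1-u+1 from by ring]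
        case inv =>
          refine ⟨hs1, by omega, by omega, hu0, by omega, ?_, ?_, ?_, ?_⟩
          · intro j h1 h2
            rcases lt_or_ge j (i+1) with h | h
            · rw [hflat j h1 (by omega), hfl]
            · rw [show j = i+1 by omega]
          · intro j h1 h2
            rcases lt_or_ge j (i+1) with h | h
            · exact hc1 j h1 (by omega)
            · rw [show j = i+1 by omega, hc0 (i+1) (by omega)]
              simp; omega
          · intro j h1
            exact hc0 j (by omega)
          · intro h2
            rcases hc3 h2 with ⟨ha, hb⟩ | ⟨ha, hb⟩
            · exact Or.inl ⟨by rw [ha, hfl], hb⟩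
            · exact Or.inr ⟨by rw [ha, hfl], hb⟩
      · rw [if_neg hfl, if_neg (show ¬ PySem.List.pyGetD line (i+1) 0 = PySem.List.pyGetD line i 0 from fun hc => hfl hc.symm), if_neg (by omega : ¬ (0:Int) > 0)]
        by_cases hdesc : PySem.List.pyGetD line i 0 = PySem.List.pyGetD line (i+1) 0 + 1
        · -- descent
          rw [if_pos hdesc, if_pos (by omega : PySem.List.pyGetD line (i+1) 0 = PySem.List.pyGetD line i 0 - 1)]
          by_cases hg : i + L > N
          · rw [if_pos hg, if_pos (by omega : i + L > N)]
          · rw [if_neg hg, if_neg (by omega : ¬ i + L > N)]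
            have hwalk := walk N L line (L-1).toNat (i+2)
              (by omega)
            rw [show ((L-1).toNat : Int) = L - 1 from by omega] at hwalk
            rw [show i+1+1 = i+2 from by ring, hwalk]
            by_cases hC : (PySem.List.pyRange (i+2) (i+L+1) 1).all
                  (fun j => PySem.List.pyGetD line j 0 == PySem.List.pyGetD line (i+1) 0) = true
            · rw [if_pos hC, if_pos ?cond]
              case cond =>
                intro k h1 h2
                have hm := List.all_eq_true.mp hC (i+2+k)
                  (by rw [PySem.List.mem_pyRange_one]; omega)
                simpa [show i+2-1 = i+1 from by ring] using hm
              · -- recurse after descent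
                have hflat' : ∀ j, i+1 ≤ j → j ≤ i+L →
                    PySem.List.pyGetD line j 0 = PySem.List.pyGetD line (i+1) 0 := by
                  intro j h1 h2
                  rcases eq_or_lt_of_le h1 with h | h
                  · rw [← h]
                  · have := List.all_eq_true.mp hC j (by rw [PySem.List.mem_pyRange_one]; omega)
                    simpa using this
                have hjs : ∀ jj ∈ PySem.List.pyRange (i+1) (i+L+1) 1,
                    0 ≤ jj ∧ jj < (check.length : Int) := by
                  intro jj hjj
                  rw [PySem.List.mem_pyRange_one] at hjj
                  constructor <;> omega
                rw [ih (i+L) (i+1) L _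
                    (by rw [foldl_set_true_length]; exact hlen2) (by omega) ?inv2]
                · rw [show (i+L)-(i+1)+1-L = 0 from by ring, show i+L+1 = i+2+(L-1) from by ring]
                case inv2 =>
                  refine ⟨by omega, by omega, by omega, by omega, by omega, ?_, ?_, ?_, ?_⟩
                  · intro j h1 h2
                    rw [hflat' j h1 h2, hflat' (i+L) (by omega) (by omega)]
                  · intro j h1 h2
                    rw [foldl_set_true_getD _ _ hjs j (by omega),
                        if_pos (by rw [PySem.List.mem_pyRange_one]; omega)]
                    simp; omega
                  · intro j h1
                    rw [foldl_set_true_getD _ _ hjs j (by omega),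
                        if_neg (by rw [PySem.List.mem_pyRange_one]; omega)]
                    exact hc0 j (by omega)
                  · intro h2
                    refine Or.inr ⟨?_, by omega⟩
                    rw [show i+1-1 = i from by ring,
                        hflat' (i+L) (by omega) (by omega), hdesc]
            · rw [if_neg hC, if_neg ?ncond]
              case ncond =>
                intro hcon
                apply hC
                rw [List.all_eq_true]
                intro j hj
                rw [PySem.List.mem_pyRange_one] at hj
                have := hcon (j - (i+2)) (by omega) (by omega)
                rw [show i+2+(j-(i+2)) = j from by ring, show i+2-1 = i+1 from by ring] at this
                simpa using this
        · by_cases hrise : PySem.List.pyGetD line i 0 = PySem.List.pyGetD line (i+1) 0 - 1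
          · -- rise
            rw [if_neg hdesc, if_pos hrise,
                if_neg (by omega : ¬ PySem.List.pyGetD line (i+1) 0 = PySem.List.pyGetD line i 0 - 1),
                if_pos (by omega : PySem.List.pyGetD line (i+1) 0 = PySem.List.pyGetD line i 0 + 1)]
            have hInv' : SInv line check N i s u :=
              ⟨hs1, hsi, hiN, hu0, hub, hflat, hc1, hc0, hc3⟩
            by_cases hLe : L ≤ i - s + 1 - u
            · obtain ⟨hnlt, hcki, hall⟩ := rise_pass N L i s u line check hL hInv' hLe
              rw [if_neg hnlt, if_neg (by rw [hcki]; simp), if_pos hall,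
                  if_neg (by omega : ¬ i - s + 1 - u < L)]
              have hjs2 : ∀ jj ∈ PySem.List.pyRange i (i-L) (-1),
                  0 ≤ jj ∧ jj < (check.length : Int) := by
                intro jj hjj
                rw [PySem.List.mem_pyRange_neg_one] at hjj
                constructor <;> omega
              rw [ih (i+1) (i+1) 0 _
                  (by rw [foldl_set_true_length]; exact hlen2) (by omega) ?inv3]
              · rw [show (i+1)-(i+1)+1-0 = 1 from by ring, show i+1+1 = i+2 from by ring]
              case inv3 =>
                refine ⟨by omega, by omega, by omega, by omega, by omega, ?_, ?_, ?_, ?_⟩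
                · intro j h1 h2
                  rw [show j = i+1 by omega]
                · intro j h1 h2
                  rw [show j = i+1 by omega,
                      foldl_set_true_getD _ _ hjs2 _ (by omega),
                      if_neg (by rw [PySem.List.mem_pyRange_neg_one]; omega),
                      hc0 (i+1) (by omega)]
                  simp
                · intro j h1
                  rw [foldl_set_true_getD _ _ hjs2 _ (by omega),
                      if_neg (by rw [PySem.List.mem_pyRange_neg_one]; omega)]
                  exact hc0 j (by omega)
                · intro h2
                  refine Or.inl ⟨by rw [show i+1-1 = i from by ring]; omega, ?_⟩
                  rw [show i+1-1 = i from by ring,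
                      foldl_set_true_getD _ _ hjs2 _ (by omega),
                      if_pos (by rw [PySem.List.mem_pyRange_neg_one]; omega)]
            · rw [if_pos (by omega : i - s + 1 - u < L)]
              by_cases hiL : i < L
              · rw [if_pos hiL]
              · rw [if_neg hiL]
                cases hcki : PySem.List.pyGetD check i false with
                | true => rw [if_pos rfl]
                | false =>
                  rw [if_neg (show ¬(false = true) by simp)]
                  rcases rise_fail N L i s u line check hInv' (by omega) hiL with hck | hallf
                  · rw [hcki] at hck; exact absurd hck (by simp)
                  · rw [if_neg (by rw [hallf]; simp)]
          · -- neither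
            rw [if_neg hdesc, if_neg hrise,
                if_neg (by omega : ¬ PySem.List.pyGetD line (i+1) 0 = PySem.List.pyGetD line i 0 - 1),
                if_neg (by omega : ¬ PySem.List.pyGetD line (i+1) 0 = PySem.List.pyGetD line i 0 + 1)]

-- ===== VERDICT (by name: the statement is the Claim_ definition above) =====
theorem search_spec : Claim_equal_search := by
  intro N L line _hdom hpre
  unfold Spec_search search search_alt
  by_cases h0 : N ≤ 0
  · rw [if_pos h0]
    have hfuel : N.toNat + 1 = Nat.succ N.toNat := rfl
    rw [hfuel]
    simp only [searchLoop]
    rw [if_neg (by omega : ¬ (1:Int) ≤ N)]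
  · obtain ⟨hL, hlen⟩ := hpre.resolve_left h0
    rw [if_neg h0]
    rw [main_sim N L line hL (N.toNat + 1) 1 1 0
          (List.replicate (N+2).toNat false) (by simp; omega) (by omega)
          ?_]
    · norm_num
    · refine ⟨le_refl _, le_refl _, by omega, le_refl _, by omega,
        fun j hj1 hj2 => ?_, fun j hj1 hj2 => ?_, fun j _ => ?_, fun h => by omega⟩
      · have hj : j = 1 := by omega
        rw [hj]
      · have hj : j = 1 := by omega
        rw [hj, pyGetD_replicate_false]
        simp
      · exact pyGetD_replicate_false _ _
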